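-- pv_equiv track=rewrite | github.com/future-agi/future-agi | futureagi/simulate/services/branch_deviation_analyzer.py | _identify_conversation_stage
-- ===== SOURCE A (Python) =====
-- def _identify_conversation_stage(content: str, speaker: str) -> str | None:
--     """
--     Identify conversation stage based on content and speaker
--
--     Args:
--         content: Transcript content
--         speaker: Speaker role (USER/ASSISTANT)
--
--     Returns:
--         Conversation stage name or None
--     """
--     # Greeting patterns
--     if any(
--         word in content
--         for word in [
--             "hello",
--             "hi",
--             "good morning",
--             "good afternoon",
--             "good evening",
--         ]
--     ):
--         return "greeting"
--
--     # Introduction patterns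
--     if any(
--         word in content
--         for word in ["introduce", "name is", "calling about", "reason for calling"]
--     ):
--         return "introduction"
--
--     # Information gathering patterns
--     if any(
--         word in content
--         for word in ["tell me", "what is", "can you", "do you have", "need to know"]
--     ):
--         return "information_gathering"
--
--     # Problem identification patterns
--     if any(
--         word in content
--         for word in ["problem", "issue", "trouble", "help with", "need help"]
--     ):
--         return "problem_identification"
--
--     # Solution offering patterns
--     if any(
--         word in content
--         for word in ["solution", "can help", "offer", "provide", "recommend"]
--     ):
--         return "solution_offering"
--
--     # Qualification patterns
--     if any(
--         word in content
--         for word in [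
--             "qualify",
--             "budget",
--             "timeline",
--             "requirements",
--             "specific needs",
--         ]
--     ):
--         return "qualification"
--
--     # Objection handling patterns
--     if any(
--         word in content
--         for word in ["concern", "worry", "not sure", "hesitant", "think about"]
--     ):
--         return "objection_handling"
--
--     # Closing patterns
--     if any(
--         word in content
--         for word in [
--             "next steps",
--             "follow up",
--             "schedule",
--             "appointment",
--             "call back",
--         ]
--     ):
--         return "closing"
--
--     # Transfer patterns
--     if any(
--         word in content
--         for word in ["transfer", "speak to", "human", "manager", "supervisor"]
--     ):
--         return "transfer"
--
--     return None
-- ===== SOURCE B (Python) =====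
-- _STAGE_NAMES = [
--     "greeting", "introduction", "information_gathering", "problem_identification",
--     "solution_offering", "qualification", "objection_handling", "closing", "transfer",
-- ]
--
-- # flat keyword -> priority map (priority = index into _STAGE_NAMES)
-- _KEYWORD_PRIORITY = {
--     "hello": 0, "hi": 0, "good morning": 0, "good afternoon": 0, "good evening": 0,
--     "introduce": 1, "name is": 1, "calling about": 1, "reason for calling": 1,
--     "tell me": 2, "what is": 2, "can you": 2, "do you have": 2, "need to know": 2,
--     "problem": 3, "issue": 3, "trouble": 3, "help with": 3, "need help": 3,
--     "solution": 4, "can help": 4, "offer": 4, "provide": 4, "recommend": 4,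
--     "qualify": 5, "budget": 5, "timeline": 5, "requirements": 5, "specific needs": 5,
--     "concern": 6, "worry": 6, "not sure": 6, "hesitant": 6, "think about": 6,
--     "next steps": 7, "follow up": 7, "schedule": 7, "appointment": 7, "call back": 7,
--     "transfer": 8, "speak to": 8, "human": 8, "manager": 8, "supervisor": 8,
-- }
--
--
-- def _identify_conversation_stage(content: str, speaker: str) -> str | None:
--     # single pass: keep the smallest priority among matched keywords
--     best = None
--     for w, p in _KEYWORD_PRIORITY.items():
--         if w in content and (best is None or p < best):
--             best = p
--     return None if best is None else _STAGE_NAMES[best]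
-- ===== Notes on version B (the rewrite author's own statement) =====
-- stated objective: alternative
-- what changed: Replaced the nine staged first-match branches by a flat keyword-to-priority map traversed once while tracking the minimum matched priority, which then indexes a stage-name list.
import Mathlib
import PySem

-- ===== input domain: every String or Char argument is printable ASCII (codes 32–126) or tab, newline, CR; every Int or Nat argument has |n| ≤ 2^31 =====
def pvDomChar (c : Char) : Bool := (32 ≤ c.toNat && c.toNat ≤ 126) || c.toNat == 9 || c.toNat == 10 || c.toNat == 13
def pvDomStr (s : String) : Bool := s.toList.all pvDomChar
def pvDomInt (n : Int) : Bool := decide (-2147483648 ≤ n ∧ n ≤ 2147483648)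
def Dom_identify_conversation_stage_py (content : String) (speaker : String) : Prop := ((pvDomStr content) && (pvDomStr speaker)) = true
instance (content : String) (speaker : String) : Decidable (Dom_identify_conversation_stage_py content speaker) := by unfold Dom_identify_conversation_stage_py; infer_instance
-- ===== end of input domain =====

-- B replaces A's nine staged first-match branches by one pass over a flat
-- keyword->priority map tracking the minimum matched priority (objective: alternative).

-- ===== PORT A =====
-- literal transliteration: nine if-branches, each 'any(w in content for w in [...])'
def identify_conversation_stage_py (content : String) (speaker : String) : Option String :=
  if ["hello", "hi", "good morning", "good afternoon", "good evening"].any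
      (fun w => PySem.Str.isIn w content) then some "greeting"
  else if ["introduce", "name is", "calling about", "reason for calling"].any
      (fun w => PySem.Str.isIn w content) then some "introduction"
  else if ["tell me", "what is", "can you", "do you have", "need to know"].any
      (fun w => PySem.Str.isIn w content) then some "information_gathering"
  else if ["problem", "issue", "trouble", "help with", "need help"].any
      (fun w => PySem.Str.isIn w content) then some "problem_identification"
  else if ["solution", "can help", "offer", "provide", "recommend"].any
      (fun w => PySem.Str.isIn w content) then some "solution_offering"
  else if ["qualify", "budget", "timeline", "requirements", "specific needs"].any
      (fun w => PySem.Str.isIn w content) then some "qualification"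
  else if ["concern", "worry", "not sure", "hesitant", "think about"].any
      (fun w => PySem.Str.isIn w content) then some "objection_handling"
  else if ["next steps", "follow up", "schedule", "appointment", "call back"].any
      (fun w => PySem.Str.isIn w content) then some "closing"
  else if ["transfer", "speak to", "human", "manager", "supervisor"].any
      (fun w => PySem.Str.isIn w content) then some "transfer"
  else none

-- ===== PORT B =====
-- the stage-name list (Python _STAGE_NAMES)
def pvStageNames : List String :=
  ["greeting", "introduction", "information_gathering", "problem_identification",
   "solution_offering", "qualification", "objection_handling", "closing", "transfer"]

-- the flat keyword -> priority map (Python _KEYWORD_PRIORITY, insertion order)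
def pvKeywordPriority : List (String × Int) :=
  [("hello", 0), ("hi", 0), ("good morning", 0), ("good afternoon", 0), ("good evening", 0),
   ("introduce", 1), ("name is", 1), ("calling about", 1), ("reason for calling", 1),
   ("tell me", 2), ("what is", 2), ("can you", 2), ("do you have", 2), ("need to know", 2),
   ("problem", 3), ("issue", 3), ("trouble", 3), ("help with", 3), ("need help", 3),
   ("solution", 4), ("can help", 4), ("offer", 4), ("provide", 4), ("recommend", 4),
   ("qualify", 5), ("budget", 5), ("timeline", 5), ("requirements", 5), ("specific needs", 5),
   ("concern", 6), ("worry", 6), ("not sure", 6), ("hesitant", 6), ("think about", 6),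
   ("next steps", 7), ("follow up", 7), ("schedule", 7), ("appointment", 7), ("call back", 7),
   ("transfer", 8), ("speak to", 8), ("human", 8), ("manager", 8), ("supervisor", 8)]

-- one loop step: 'if w in content and (best is None or p < best): best = p'
def pvBestStep (content : String) (best : Option Int) (kw : String × Int) : Option Int :=
  if PySem.Str.isIn kw.1 content &&
      (match best with | none => true | some m => decide (kw.2 < m)) then
    some kw.2
  else best

def identify_conversation_stage_py_alt (content : String) (speaker : String) : Option String :=
  match pvKeywordPriority.foldl (pvBestStep content) none with
  | none => none
  | some b => (PySem.List.pyGet? pvStageNames b).getD ""   -- b ∈ [0,8], so never the default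

-- ===== PRECONDITION & SPEC =====
def Spec_identify_conversation_stage_py (content : String) (speaker : String) (out : Option String) : Prop := out = identify_conversation_stage_py_alt content speaker
instance (content : String) (speaker : String) (out : Option String) : Decidable (Spec_identify_conversation_stage_py content speaker out) := by unfold Spec_identify_conversation_stage_py; infer_instance

-- ===== CLAIM =====
def Claim_equal_identify_conversation_stage_py : Prop := ∀ (content : String) (speaker : String), Dom_identify_conversation_stage_py content speaker → Spec_identify_conversation_stage_py content speaker (identify_conversation_stage_py content speaker)

-- ===== LEMMAS AND PROOFS =====

-- proof-only helper: the effect of one constant-priority keyword block on the accumulator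
def pvMerge (acc : Option Int) (b : Bool) (i : Int) : Option Int :=
  if b then
    (match acc with
     | none => some i
     | some m => if i < m then some i else some m)
  else acc

theorem pvMerge_step (content : String) (w : String) (i : Int) (acc : Option Int) (b : Bool) :
    pvMerge (pvBestStep content acc (w, i)) b i
      = pvMerge acc (PySem.Str.isIn w content || b) i := by
  by_cases hw : PySem.Chars.isIn w.toList content.toList = true
  · cases acc with
    | none => cases b <;> simp [pvMerge, pvBestStep, hw]
    | some m =>
      by_cases him : i < m <;>
        cases b <;>
          simp [pvMerge, pvBestStep, hw, him]
  · simp only [Bool.not_eq_true] at hw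
    cases b <;> simp [pvMerge, pvBestStep, hw]

-- folding one constant-priority keyword block = pvMerge with the block's any-match bit
theorem pvFold_block (content : String) (ws : List String) (i : Int) (acc : Option Int) :
    (ws.map (fun w => (w, i))).foldl (pvBestStep content) acc
      = pvMerge acc (ws.any (fun w => PySem.Str.isIn w content)) i := by
  induction ws generalizing acc with
  | nil => simp [pvMerge]
  | cons w ws ih =>
    simp only [List.map, List.foldl, List.any_cons, ih, pvMerge_step]

theorem pvKeywordPriority_blocks :
    pvKeywordPriority
      = (["hello", "hi", "good morning", "good afternoon", "good evening"].map (fun w => (w, (0:Int))))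
        ++ (["introduce", "name is", "calling about", "reason for calling"].map (fun w => (w, (1:Int))))
        ++ (["tell me", "what is", "can you", "do you have", "need to know"].map (fun w => (w, (2:Int))))
        ++ (["problem", "issue", "trouble", "help with", "need help"].map (fun w => (w, (3:Int))))
        ++ (["solution", "can help", "offer", "provide", "recommend"].map (fun w => (w, (4:Int))))
        ++ (["qualify", "budget", "timeline", "requirements", "specific needs"].map (fun w => (w, (5:Int))))
        ++ (["concern", "worry", "not sure", "hesitant", "think about"].map (fun w => (w, (6:Int))))
        ++ (["next steps", "follow up", "schedule", "appointment", "call back"].map (fun w => (w, (7:Int))))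
        ++ (["transfer", "speak to", "human", "manager", "supervisor"].map (fun w => (w, (8:Int)))) := rfl

-- ===== VERDICT =====
theorem identify_conversation_stage_py_spec : Claim_equal_identify_conversation_stage_py := by
  intro content speaker _
  unfold Spec_identify_conversation_stage_py identify_conversation_stage_py
    identify_conversation_stage_py_alt
  rw [pvKeywordPriority_blocks]
  simp only [List.foldl_append, pvFold_block]
  generalize (["hello", "hi", "good morning", "good afternoon", "good evening"].any
      (fun w => PySem.Str.isIn w content)) = b1
  generalize (["introduce", "name is", "calling about", "reason for calling"].any
      (fun w => PySem.Str.isIn w content)) = b2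
  generalize (["tell me", "what is", "can you", "do you have", "need to know"].any
      (fun w => PySem.Str.isIn w content)) = b3
  generalize (["problem", "issue", "trouble", "help with", "need help"].any
      (fun w => PySem.Str.isIn w content)) = b4
  generalize (["solution", "can help", "offer", "provide", "recommend"].any
      (fun w => PySem.Str.isIn w content)) = b5
  generalize (["qualify", "budget", "timeline", "requirements", "specific needs"].any
      (fun w => PySem.Str.isIn w content)) = b6
  generalize (["concern", "worry", "not sure", "hesitant", "think about"].any
      (fun w => PySem.Str.isIn w content)) = b7
  generalize (["next steps", "follow up", "schedule", "appointment", "call back"].any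
      (fun w => PySem.Str.isIn w content)) = b8
  generalize (["transfer", "speak to", "human", "manager", "supervisor"].any
      (fun w => PySem.Str.isIn w content)) = b9
  revert b1 b2 b3 b4 b5 b6 b7 b8 b9
  decide
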